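-- pv_equiv track=rewrite | github.com/refparo/cau25308007-db-project | backend/backend/utils.py | week_to_str
-- ===== SOURCE A (Python) =====
-- def week_to_str(bits: int):
--   def make_range(start: int, end: int):
--     if start == end:
--       return f"{start}"
--     else:
--       return f"{start}-{end}"
--   week_ranges = list[str]()
--   begin = 0
--   in_range = False
--   i = 0
--   while bits > 0:
--     if bits & 1:
--       if not in_range:
--         begin = i
--         in_range = True
--     else:
--       if in_range:
--         week_ranges.append(make_range(begin + 1, i))
--         in_range = False
--     i += 1
--     bits >>= 1
--   if in_range:
--     week_ranges.append(make_range(begin + 1, i))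
--   return ", ".join(week_ranges)
-- ===== SOURCE B (Python) =====
-- def week_to_str(bits: int):
--   # pass 1: collect 1-based positions of set bits
--   pos = []
--   i = 1
--   while bits > 0:
--     if bits & 1:
--       pos.append(i)
--     i += 1
--     bits >>= 1
--   # pass 2: coalesce maximal runs of consecutive positions
--   def fmt(s: int, e: int):
--     return str(s) if s == e else f"{s}-{e}"
--   parts = []
--   if pos:
--     start = prev = pos[0]
--     for p in pos[1:]:
--       if p == prev + 1:
--         prev = p
--       else:
--         parts.append(fmt(start, prev))
--         start = prev = p
--     parts.append(fmt(start, prev))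
--   return ", ".join(parts)
-- ===== Notes on version B (the rewrite author's own statement) =====
-- stated objective: alternative
-- what changed: A runs one fused state-machine loop over the bits (in_range/begin flags with range strings emitted mid-scan); B first extracts the list of one-based set-bit positions, then coalesces consecutive runs of that list in a separate pass.
import Mathlib
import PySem

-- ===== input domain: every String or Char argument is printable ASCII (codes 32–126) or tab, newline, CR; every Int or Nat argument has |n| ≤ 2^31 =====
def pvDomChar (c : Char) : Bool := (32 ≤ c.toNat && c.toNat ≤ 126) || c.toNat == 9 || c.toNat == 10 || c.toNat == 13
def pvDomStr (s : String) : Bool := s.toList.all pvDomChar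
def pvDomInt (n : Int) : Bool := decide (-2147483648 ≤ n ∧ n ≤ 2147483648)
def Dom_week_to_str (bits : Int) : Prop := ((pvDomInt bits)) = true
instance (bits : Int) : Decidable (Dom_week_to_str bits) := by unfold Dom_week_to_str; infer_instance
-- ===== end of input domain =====

-- B: extracts the 1-based set-bit positions in one scan, then coalesces consecutive runs
-- in a second pass — a different decomposition of A's single fused state-machine loop;
-- same cost (objective: alternative).


-- ===== PORT A =====
-- make_range(start, end)
def mkRange (s e : Int) : String :=
  if s = e then PySem.Int.toStr s else PySem.Int.toStr s ++ "-" ++ PySem.Int.toStr e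

-- A's while loop over (week_ranges, begin, in_range, i, bits); the trailing
-- 'if in_range: append' is the base case.  For bits > 0, Python's 'bits >> 1' is
-- 'bits / 2' and 'bits & 1' is 'bits % 2' (exact: Lean Int division is Euclidean,
-- which agrees with Python's floor division on nonnegative arguments).
def aloop (bits : Int) (acc : List String) (begin_ : Int) (inr : Bool) (i : Int) : List String :=
  if bits > 0 then
    if bits % 2 = 1 then
      aloop (bits / 2) acc (if inr then begin_ else i) true (i + 1)
    else
      aloop (bits / 2) (if inr then acc ++ [mkRange (begin_ + 1) i] else acc) begin_ false (i + 1)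
  else
    if inr then acc ++ [mkRange (begin_ + 1) i] else acc
termination_by bits.toNat
decreasing_by all_goals omega

def week_to_str (bits : Int) : String :=
  PySem.Str.join ", " (aloop bits [] 0 false 0)

-- ===== PORT B =====
-- pass 1: 1-based positions of set bits
def positions (bits : Int) (i : Int) : List Int :=
  if bits > 0 then
    (if bits % 2 = 1 then [i] else []) ++ positions (bits / 2) (i + 1)
  else []
termination_by bits.toNat
decreasing_by omega

def fmtRange (s e : Int) : String :=
  if s = e then PySem.Int.toStr s else PySem.Int.toStr s ++ "-" ++ PySem.Int.toStr e

-- pass 2: the 'for p in pos[1:]' run-coalescing loop with state (parts, start, prev)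
def runsGo (acc : List String) (start prev : Int) : List Int → List String
  | [] => acc ++ [fmtRange start prev]
  | p :: ps =>
    if p = prev + 1 then runsGo acc start p ps
    else runsGo (acc ++ [fmtRange start prev]) p p ps

def week_to_str_alt (bits : Int) : String :=
  let pos := positions bits 1
  PySem.Str.join ", "
    (match pos with
     | [] => []
     | x :: xs => runsGo [] x x xs)

-- ===== PRECONDITION & SPEC =====
def Spec_week_to_str (bits : Int) (out : String) : Prop := out = week_to_str_alt bits
instance (bits : Int) (out : String) : Decidable (Spec_week_to_str bits out) := by unfold Spec_week_to_str; infer_instance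

-- ===== CLAIM (what is proved, stated in full; the proofs are below) =====
def Claim_equal_week_to_str : Prop := ∀ (bits : Int), Dom_week_to_str bits → Spec_week_to_str bits (week_to_str bits)

-- ===== LEMMAS AND PROOFS =====

theorem positions_lb (n : Nat) : ∀ (bits j : Int), bits.toNat = n →
    ∀ x ∈ positions bits j, j ≤ x := by
  induction n using Nat.strong_induction_on with
  | _ n ih =>
    intro bits j hn x hx
    rw [positions] at hx
    by_cases hpos : bits > 0
    · simp only [if_pos hpos, List.mem_append] at hx
      have hlt : (bits / 2).toNat < n := by omega
      rcases hx with hx | hx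
      · split at hx <;> simp_all
      · have := ih _ hlt (bits / 2) (j + 1) rfl x hx
        omega
    · simp [if_neg hpos] at hx

theorem runsGo_acc (l : List Int) : ∀ (acc : List String) (s p : Int),
    runsGo acc s p l = acc ++ runsGo [] s p l := by
  induction l with
  | nil => intro acc s p; simp [runsGo]
  | cons y ys ih =>
    intro acc s p
    by_cases h : y = p + 1
    · simp only [runsGo, if_pos h]
      exact ih acc s y
    · simp only [runsGo, if_neg h, List.nil_append]
      rw [ih (acc ++ [fmtRange s p]), ih [fmtRange s p]]
      simp

-- the formatted runs of a (sorted, here: lower-bounded) position list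
def fmtRuns : List Int → List String
  | [] => []
  | x :: xs => runsGo [] x x xs

theorem aloop_eq (n : Nat) : ∀ (bits i b : Int) (acc : List String), bits.toNat = n →
    (aloop bits acc b false i = acc ++ fmtRuns (positions bits (i + 1))) ∧
    (aloop bits acc b true i = runsGo acc (b + 1) i (positions bits (i + 1))) := by
  induction n using Nat.strong_induction_on with
  | _ n ih =>
    intro bits i b acc hn
    by_cases hpos : bits > 0
    · have hlt : (bits / 2).toNat < n := by omega
      have h2 : (0:Int) ≤ bits / 2 := by positivity
      by_cases hodd : bits % 2 = 1
      · -- set bit: positions bits (i+1) = (i+1) :: positions (bits/2) (i+2)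
        have hp : positions bits (i + 1) = (i + 1) :: positions (bits / 2) (i + 1 + 1) := by
          rw [positions]; simp [hpos, hodd]
        constructor
        · rw [aloop]
          simp only [if_pos hpos, if_pos hodd, Bool.false_eq_true, if_false]
          rw [(ih _ hlt (bits / 2) (i + 1) i acc rfl).2, hp]
          simp only [fmtRuns]
          rw [runsGo_acc]
        · rw [aloop]
          simp only [if_pos hpos, if_pos hodd, if_true]
          rw [(ih _ hlt (bits / 2) (i + 1) b acc rfl).2, hp]
          simp [runsGo]
      · have hp : positions bits (i + 1) = positions (bits / 2) (i + 1 + 1) := by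
          rw [positions]; simp [hpos, hodd]
        constructor
        · rw [aloop]
          simp only [if_pos hpos, if_neg hodd, Bool.false_eq_true, if_false]
          rw [(ih _ hlt (bits / 2) (i + 1) b acc rfl).1, hp]
        · rw [aloop]
          simp only [if_pos hpos, if_neg hodd, if_true]
          rw [(ih _ hlt (bits / 2) (i + 1) b (acc ++ [mkRange (b + 1) i]) rfl).1, hp]
          -- the tail's positions all exceed i+1, so the run (b+1, i) closes here
          cases hrest : positions (bits / 2) (i + 1 + 1) with
          | nil => simp [fmtRuns, runsGo, mkRange, fmtRange]
          | cons y ys =>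
            have hy : i + 1 + 1 ≤ y := by
              have := positions_lb (bits / 2).toNat (bits / 2) (i + 1 + 1) rfl y
              simp [hrest] at this; exact this
            have hne : y ≠ i + 1 := by omega
            simp only [fmtRuns, runsGo, if_neg hne]
            rw [runsGo_acc ys (acc ++ [fmtRange (b + 1) i]) y y]
            simp [mkRange, fmtRange]
    · have hp : positions bits (i + 1) = [] := by rw [positions]; simp [hpos]
      constructor
      · rw [aloop]; simp [hpos, hp, fmtRuns]
      · rw [aloop]; simp [hpos, hp, runsGo, mkRange, fmtRange]

-- ===== VERDICT (by name: the statement is the Claim_ definition above) =====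
theorem week_to_str_spec : Claim_equal_week_to_str := by
  intro bits _
  unfold Spec_week_to_str week_to_str week_to_str_alt
  have h := (aloop_eq bits.toNat bits 0 0 [] rfl).1
  norm_num at h
  rw [h]
  cases hp : positions bits 1 <;> simp [fmtRuns]
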